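-- pv_equiv track=rewrite | github.com/dvbogdan/takionStatArb | src/prototyping/statarbongroups_bot/common_math.py | get_n_items_q
-- ===== SOURCE A (Python) =====
-- def get_n_items_q(a, q_list):
--     r = []
--     n = len(a)
--     for q in q_list:
--         m = -1
--         for j in range(n):
--             if a[j] < q:
--                 m = j
--                 break
--         if m == -1:
--             m = n
--         r.append(m)
--     return r
-- ===== SOURCE B (Python) =====
-- def get_n_items_q(a, q_list):
--     # prefix minima: pm[i] = min(a[0..i]); non-increasing
--     pm = []
--     m = None
--     for x in a:
--         m = x if m is None or x < m else m
--         pm.append(m)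
--     n = len(a)
--     res = []
--     for q in q_list:
--         # binary search: first index with pm[idx] < q, else n
--         lo, hi = 0, n
--         while lo < hi:
--             mid = (lo + hi) // 2
--             if pm[mid] < q:
--                 hi = mid
--             else:
--                 lo = mid + 1
--         res.append(lo)
--     return res
-- ===== Notes on version B (the rewrite author's own statement) =====
-- stated objective: faster
-- what changed: Replaces the per-query linear scan with a prefix-minimum array built once plus a binary search per query (the first index with a[j]<q equals the first index where the non-increasing prefix minimum drops below q).
import Mathlib
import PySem

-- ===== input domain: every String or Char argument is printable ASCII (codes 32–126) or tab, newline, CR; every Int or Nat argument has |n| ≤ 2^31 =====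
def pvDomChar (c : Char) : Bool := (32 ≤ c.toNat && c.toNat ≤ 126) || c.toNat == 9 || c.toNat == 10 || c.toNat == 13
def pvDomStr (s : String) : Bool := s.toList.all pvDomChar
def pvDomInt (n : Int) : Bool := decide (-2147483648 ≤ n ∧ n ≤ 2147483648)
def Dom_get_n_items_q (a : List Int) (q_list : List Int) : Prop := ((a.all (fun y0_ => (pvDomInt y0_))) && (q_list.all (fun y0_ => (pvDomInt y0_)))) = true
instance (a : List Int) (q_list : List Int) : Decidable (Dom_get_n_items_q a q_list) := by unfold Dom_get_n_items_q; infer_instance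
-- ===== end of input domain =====

-- B replaces A's per-query linear scan with a prefix-minimum array + binary search per query (faster, asymptotic).


-- ===== PORT A =====
-- inner 'for j in range(n): if a[j] < q: m = j; break' — scan with running index, -1 if no hit
def aScan (q : Int) (j : Int) : List Int → Int
  | [] => -1
  | x :: xs => if x < q then j else aScan q (j + 1) xs

def get_n_items_q (a : List Int) (q_list : List Int) : List Int :=
  q_list.map (fun q =>
    let m := aScan q 0 a
    if m = -1 then (a.length : Int) else m)

-- ===== PORT B =====
-- prefix minima; 'x if m is None or x < m else m' with Python accumulator m = None
def pmins (o : Option Int) : List Int → List Int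
  | [] => []
  | x :: xs =>
    match o with
    | none => x :: pmins (some x) xs
    | some m => (if x < m then x else m) :: pmins (some (if x < m then x else m)) xs

-- 'while lo < hi: mid = (lo+hi)//2; ...' binary search for first index with pm[mid] < q;
-- fuel = hi - lo bounds the iteration count (the interval shrinks each step), structural recursion
def bsearchFuel (pm : List Int) (q : Int) : Nat → Nat → Nat → Nat
  | 0, lo, _ => lo
  | fuel + 1, lo, hi =>
    if lo < hi then
      if pm.getD ((lo + hi) / 2) 0 < q then bsearchFuel pm q fuel lo ((lo + hi) / 2)
      else bsearchFuel pm q fuel ((lo + hi) / 2 + 1) hi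
    else lo

def bsearch (pm : List Int) (q : Int) (lo hi : Nat) : Nat :=
  bsearchFuel pm q (hi - lo) lo hi

def get_n_items_q_alt (a : List Int) (q_list : List Int) : List Int :=
  let pm := pmins none a
  let n := a.length
  q_list.map (fun q => ((bsearch pm q 0 n : Nat) : Int))

-- ===== PRECONDITION & SPEC =====
def Spec_get_n_items_q (a : List Int) (q_list : List Int) (out : List Int) : Prop := out = get_n_items_q_alt a q_list
instance (a : List Int) (q_list : List Int) (out : List Int) : Decidable (Spec_get_n_items_q a q_list out) := by unfold Spec_get_n_items_q; infer_instance

-- ===== CLAIM (what is proved, stated in full; the proofs are below) =====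
def Claim_equal_get_n_items_q : Prop := ∀ (a : List Int) (q_list : List Int), Dom_get_n_items_q a q_list → Spec_get_n_items_q a q_list (get_n_items_q a q_list)

-- ===== LEMMAS AND PROOFS =====

-- common reference: first index j with a[j] < q, else a.length
def firstLt (q : Int) : List Int → Nat
  | [] => 0
  | x :: xs => if x < q then 0 else firstLt q xs + 1

theorem firstLt_le_length (q : Int) (a : List Int) : firstLt q a ≤ a.length := by
  induction a with
  | nil => simp [firstLt]
  | cons x xs ih => simp only [firstLt, List.length_cons]; split <;> omega

-- A side
theorem aScan_eq (q : Int) (a : List Int) (j : Int) :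
    aScan q j a = if firstLt q a = a.length then -1 else j + firstLt q a := by
  induction a generalizing j with
  | nil => simp [aScan, firstLt]
  | cons x xs ih =>
    simp only [aScan, firstLt, List.length_cons]
    by_cases hx : x < q
    · rw [if_pos hx, if_pos hx, if_neg (by omega)]
      simp
    · rw [if_neg hx, if_neg hx, ih]
      have := firstLt_le_length q xs
      by_cases hf : firstLt q xs = xs.length
      · rw [if_pos hf, if_pos (by omega)]
      · rw [if_neg hf, if_neg (by omega)]
        push_cast
        ring

theorem getA_eq (a : List Int) (q : Int) :
    (let m := aScan q 0 a; if m = -1 then (a.length : Int) else m) = (firstLt q a : Int) := by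
  have := firstLt_le_length q a
  simp only [aScan_eq]
  by_cases hf : firstLt q a = a.length
  · rw [if_pos hf, if_pos rfl, hf]
  · rw [if_neg hf, if_neg (by omega)]
    omega

-- B side: prefix-minimum characterisation
theorem ite_min_lt_iff (x m q : Int) : ((if x < m then x else m) < q ↔ (x < q ∨ m < q)) := by
  split_ifs <;> omega

theorem pmins_some_lt (q m : Int) (a : List Int) (i : Nat) (hi : i < a.length) :
    ((pmins (some m) a).getD i 0 < q ↔ (m < q ∨ firstLt q a ≤ i)) := by
  induction a generalizing m i with
  | nil => simp at hi
  | cons x xs ih =>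
    cases i with
    | zero =>
      simp only [pmins, List.getD_cons_zero, firstLt]
      rw [ite_min_lt_iff]
      by_cases hx : x < q <;> simp [hx]
    | succ i =>
      simp only [pmins, List.getD_cons_succ, firstLt]
      rw [ih _ _ (by simpa using hi), ite_min_lt_iff]
      by_cases hx : x < q <;> simp [hx]

theorem pmins_lt (q : Int) (a : List Int) (i : Nat) (hi : i < a.length) :
    ((pmins none a).getD i 0 < q ↔ firstLt q a ≤ i) := by
  cases a with
  | nil => simp at hi
  | cons x xs =>
    cases i with
    | zero =>
      simp only [pmins, List.getD_cons_zero, firstLt]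
      by_cases hx : x < q <;> simp [hx]
    | succ i =>
      simp only [pmins, List.getD_cons_succ, firstLt]
      rw [pmins_some_lt q x xs i (by simpa using hi)]
      by_cases hx : x < q <;> simp [hx]

theorem bsearchFuel_eq (a : List Int) (q : Int) (fuel : Nat) :
    ∀ lo hi : Nat, hi - lo ≤ fuel → lo ≤ firstLt q a → firstLt q a ≤ hi → hi ≤ a.length →
    bsearchFuel (pmins none a) q fuel lo hi = firstLt q a := by
  induction fuel with
  | zero => intro lo hi hf hk1 hk2 _; simp only [bsearchFuel]; omega
  | succ fuel ih =>
    intro lo hi hf hk1 hk2 hn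
    simp only [bsearchFuel]
    by_cases h : lo < hi
    · rw [if_pos h]
      have hmid1 : (lo + hi) / 2 < hi := by omega
      have hmid2 : lo ≤ (lo + hi) / 2 := by omega
      have hlt := pmins_lt q a ((lo + hi) / 2) (by omega)
      split_ifs with hc
      · exact ih lo _ (by omega) hk1 (hlt.mp hc) (by omega)
      · have hgt : ¬ firstLt q a ≤ (lo + hi) / 2 := fun hle => hc (hlt.mpr hle)
        exact ih _ hi (by omega) (by omega) hk2 hn
    · rw [if_neg h]
      omega

theorem bsearch_eq (a : List Int) (q : Int) (lo hi : Nat)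
    (hk1 : lo ≤ firstLt q a) (hk2 : firstLt q a ≤ hi) (hn : hi ≤ a.length) :
    bsearch (pmins none a) q lo hi = firstLt q a :=
  bsearchFuel_eq a q (hi - lo) lo hi le_rfl hk1 hk2 hn

-- ===== VERDICT (by name: the statement is the Claim_ definition above) =====
theorem get_n_items_q_spec : Claim_equal_get_n_items_q := by
  intro a q_list _
  unfold Spec_get_n_items_q get_n_items_q get_n_items_q_alt
  apply List.map_congr_left
  intro q _
  rw [getA_eq, bsearch_eq a q 0 a.length (Nat.zero_le _) (firstLt_le_length q a) le_rfl]
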